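-- pv_equiv track=rewrite | github.com/Bitbol-Lab/rag-esm | src/rag_esm/modules/dataloaders.py | degap_and_track_modifications
-- ===== SOURCE A (Python) =====
-- def degap_and_track_modifications(a,b):
--     """
--     Input: a,b fasta sequences in a3m format. They are aligned with gaps but have insertions as lowercase characters.
--     Example input: a = "AabB--C---D", b = "AB--C-abcd--D". To be aligned, lowercase characters must be removed.
--     This function internally aligns a and b by removing lowercase characters and returns the positions in the original a that are different from b
--     when a and b are aligned. Then returns the degapped a and b (a and b without gaps and with lowercase characters promoted to uppercase),
--     also returns a boolean list of the same length as the new a that is True if the corresponding position in a is different from b when a and b are aligned.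
--     """
--     # Original a and b to be aligned
--     a_orig = a
--     b_orig = b
--     # positions of non-lowercase characters in a and b
--     a_pos = [i for i, c in enumerate(a) if not c.islower()]
--     # b_pos = [i for i, c in enumerate(b) if not c.islower()]
--
--     # align a and b by removing lowercase characters
--     a = [c for c in a if not c.islower()]
--     b = [c for c in b if not c.islower()]
--
--     # positions in original a that are different from b when a and b are aligned
--     res = [i for i,aa,bb in zip(a_pos,a,b) if aa!=bb and aa!="-"]
--     res_a = "".join([aa for i,aa,bb in zip(a_pos,a,b) if aa!=bb and aa!="-"])
--
--     # boolean list of all enties in a_orig that are different from b when a and b are aligned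
--     bol = [True if i in res else False for i, aa in enumerate(a_orig)]
--     final_bol = [bo for bo, aa in zip(bol, a_orig) if aa!="-"]
--     final_a = a_orig.replace("-", "").upper()
--     # final_b = b_orig.replace("-", "").upper()
--
--     # check that the entries of final_a True in final_bol are the same as the entries in res_a
--     assert len(final_a) == len(final_bol), f"Error in degap_and_track_modifications: {len(final_a)} != {len(final_bol)}"
--     tmp = "".join([aa for aa, bo in zip(final_a, final_bol) if bo])
--     assert tmp == res_a, f"Error in degap_and_track_modifications: {tmp} != {res_a}" + f"\n{final_a}\n{final_bol}"
--
--     return final_bol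
-- ===== SOURCE B (Python) =====
-- def degap_and_track_modifications(a, b):
--     # Single pass over a with a counter into the aligned (lowercase-removed) streams.
--     a_up = [c for c in a if not c.islower()]
--     b_up = [c for c in b if not c.islower()]
--     n = min(len(a_up), len(b_up))
--     out = []
--     k = 0
--     for c in a:
--         if c.islower():
--             out.append(False)
--         elif c == "-":
--             k += 1
--         else:
--             out.append(k < n and a_up[k] != b_up[k])
--             k += 1
--     return out
-- ===== Notes on version B (the rewrite author's own statement) =====
-- stated objective: simpler
-- what changed: Replaces A's five passes (index list a_pos, two filtered zips building res, the per-character 'i in res' membership scan building bol, and the final gap filter) with a single pass over a that keeps one counter into the aligned (lowercase-removed) streams; the never-firing asserts and unused strings are dropped.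
import Mathlib
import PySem

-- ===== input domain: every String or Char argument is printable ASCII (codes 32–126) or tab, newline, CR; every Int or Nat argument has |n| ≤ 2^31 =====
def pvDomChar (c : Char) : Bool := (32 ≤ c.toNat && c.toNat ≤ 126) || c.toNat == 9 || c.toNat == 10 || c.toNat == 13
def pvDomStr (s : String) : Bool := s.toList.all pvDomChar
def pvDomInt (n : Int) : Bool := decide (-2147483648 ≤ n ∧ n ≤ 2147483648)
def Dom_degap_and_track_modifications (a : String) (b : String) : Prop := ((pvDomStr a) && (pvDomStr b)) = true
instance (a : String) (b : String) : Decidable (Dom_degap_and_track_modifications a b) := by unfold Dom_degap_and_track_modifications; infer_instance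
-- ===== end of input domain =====

-- B replaces A's index lists, membership test and two filtered zips by one counted pass over a; objective: simpler.


-- ===== PORT A =====
-- Literal port of A; the two asserts and the unused res_a/final_a/tmp strings cannot affect
-- the returned final_bol (and the asserts never fire), so only the value-producing code is ported.
def degap_and_track_modifications (a : String) (b : String) : List Bool :=
  let aOrig := a.toList
  let aPos := ((PySem.List.enumerate aOrig).filter (fun p => !(PySem.Chars.islower p.2))).map (·.1)
  let aU := aOrig.filter (fun c => !(PySem.Chars.islower c))
  let bU := b.toList.filter (fun c => !(PySem.Chars.islower c))
  let res := ((aPos.zip (aU.zip bU)).filter (fun t => t.2.1 != t.2.2 && t.2.1 != '-')).map (·.1)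
  let bol := (PySem.List.enumerate aOrig).map (fun p => res.contains p.1)
  ((bol.zip aOrig).filter (fun p => p.2 != '-')).map (·.1)

-- ===== PORT B =====
-- the single counted pass of Source B: k indexes the aligned (lowercase-removed) streams
def pvBGo (aU bU : List Char) (n : Nat) : List Char → Nat → List Bool
  | [], _ => []
  | c :: t, k =>
    if PySem.Chars.islower c then false :: pvBGo aU bU n t k
    else if c = '-' then pvBGo aU bU n t (k + 1)
    else (decide (k < n) && (aU.getD k ' ' != bU.getD k ' ')) :: pvBGo aU bU n t (k + 1)

def degap_and_track_modifications_alt (a : String) (b : String) : List Bool :=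
  let aU := a.toList.filter (fun c => !(PySem.Chars.islower c))
  let bU := b.toList.filter (fun c => !(PySem.Chars.islower c))
  pvBGo aU bU (min aU.length bU.length) a.toList 0

-- ===== PRECONDITION & SPEC =====
def Spec_degap_and_track_modifications (a : String) (b : String) (out : List Bool) : Prop := out = degap_and_track_modifications_alt a b
instance (a : String) (b : String) (out : List Bool) : Decidable (Spec_degap_and_track_modifications a b out) := by unfold Spec_degap_and_track_modifications; infer_instance

-- ===== CLAIM (what is proved, stated in full; the proofs are below) =====
def Claim_equal_degap_and_track_modifications : Prop := ∀ (a : String) (b : String), Dom_degap_and_track_modifications a b → Spec_degap_and_track_modifications a b (degap_and_track_modifications a b)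

-- ===== LEMMAS AND PROOFS =====

-- recursive characterisation of A's `res` list (proof helper)
def pvResR : List Char → List Char → Int → List Int
  | [], _, _ => []
  | c :: t, bs, i =>
    if PySem.Chars.islower c then pvResR t bs (i + 1)
    else match bs with
      | [] => []
      | bb :: bt => (if c ≠ bb ∧ c ≠ '-' then [i] else []) ++ pvResR t bt (i + 1)

lemma pvResR_ge : ∀ (l bs : List Char) (i m : Int), m ∈ pvResR l bs i → i ≤ m := by
  intro l
  induction l with
  | nil => intro bs i m h; simp [pvResR] at h
  | cons c t ih =>
    intro bs i m h
    simp only [pvResR] at h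
    split_ifs at h with hc
    · have := ih bs (i + 1) m h; omega
    · cases bs with
      | nil => simp at h
      | cons bb bt =>
        simp only [List.mem_append] at h
        rcases h with h | h
        · split_ifs at h with hcb <;> simp at h; omega
        · have := ih bt (i + 1) m h; omega

-- A's comprehension-built res equals the recursion pvResR
lemma pvRes_eq : ∀ (l bs : List Char) (i : Int),
    (((((PySem.List.enumerate l i).filter (fun p => !(PySem.Chars.islower p.2))).map (·.1)).zip
        ((l.filter (fun c => !(PySem.Chars.islower c))).zip bs)).filter
          (fun t => t.2.1 != t.2.2 && t.2.1 != '-')).map (·.1)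
    = pvResR l bs i := by
  intro l
  induction l with
  | nil => intro bs i; simp [PySem.List.enumerate_nil, pvResR]
  | cons c t ih =>
    intro bs i
    simp only [PySem.List.enumerate_cons, pvResR, List.filter_cons]
    by_cases hc : PySem.Chars.islower c
    · simp [hc, ih bs (i + 1)]
    · cases bs with
      | nil =>
        simp [hc]
      | cons bb bt =>
        simp only [hc, Bool.not_false, if_pos, List.map_cons, List.filter_cons, List.zip_cons_cons]
        by_cases hcb : c ≠ bb ∧ c ≠ '-'
        · have : (c != bb && c != '-') = true := by
            simp [bne_iff_ne, hcb.1, hcb.2]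
          simp [this, hcb, ih bt (i + 1)]
        · have : (c != bb && c != '-') = false := by
            rcases not_and_or.mp hcb with h | h <;> simp [bne_iff_ne] at * <;> simp [h]
          simp [this, hcb, ih bt (i + 1)]

-- main invariant: A's tail computation equals B's counted pass
lemma pvResR_nil_b : ∀ (l : List Char) (i : Int), pvResR l [] i = [] := by
  intro l
  induction l with
  | nil => intro i; simp [pvResR]
  | cons c t ih =>
    intro i
    simp only [pvResR]
    split_ifs with hc
    · exact ih (i + 1)
    · rfl

lemma pvMain (aU bU : List Char) (R : List Int) :
    ∀ (l bs : List Char) (i : Int) (k : Nat),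
      aU.drop k = l.filter (fun c => !(PySem.Chars.islower c)) →
      bs = bU.drop k →
      (∀ m : Int, i ≤ m → (m ∈ R ↔ m ∈ pvResR l bs i)) →
      ((((PySem.List.enumerate l i).map (fun p => R.contains p.1)).zip l).filter
          (fun p => p.2 != '-')).map (·.1)
      = pvBGo aU bU (min aU.length bU.length) l k := by
  intro l
  induction l with
  | nil => intro bs i k _ _ _; simp [PySem.List.enumerate_nil, pvBGo]
  | cons c t ih =>
    intro bs i k h1 h2 h3
    have hRi : R.contains i = decide (i ∈ pvResR (c :: t) bs i) := by
      have := h3 i le_rfl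
      simp [this]
    by_cases hc : PySem.Chars.islower c
    · -- lowercase: emits False, k unchanged
      have hnot : i ∉ pvResR (c :: t) bs i := by
        intro hmem
        simp only [pvResR, if_pos hc] at hmem
        have := pvResR_ge t bs (i + 1) i hmem; omega
      have h3' : ∀ m : Int, i + 1 ≤ m → (m ∈ R ↔ m ∈ pvResR t bs (i + 1)) := by
        intro m hm
        rw [h3 m (by omega)]
        simp [pvResR, hc]
      have hcm : c ≠ '-' := by
        intro h; subst h; simp [PySem.Chars.islower] at hc
      simp only [PySem.List.enumerate_cons, List.map_cons, List.zip_cons_cons,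
        List.filter_cons, pvBGo, if_pos hc]
      have hfil : (c != '-') = true := by simp [bne_iff_ne, hcm]
      rw [hfil]
      simp only [if_pos, List.map_cons]
      rw [hRi, ih bs (i + 1) k (by rw [h1]; simp [hc]) h2 h3',
        decide_eq_false hnot]
    · -- non-lowercase: c is aU[k]
      have h1' : aU.drop (k + 1) = t.filter (fun c => !(PySem.Chars.islower c)) := by
        have hd : aU.drop (k + 1) = (aU.drop k).drop 1 := by
          rw [List.drop_drop]
        rw [hd, h1]; simp [hc]
      have hk : k < aU.length := by
        by_contra hk
        rw [List.drop_eq_nil_of_le (by omega)] at h1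
        simp [hc] at h1
      have haUk : aU.getD k ' ' = c := by
        have h1c : aU.drop k = c :: t.filter (fun c => !(PySem.Chars.islower c)) := by
          rw [h1]; simp [hc]
        rw [List.drop_eq_getElem_cons hk] at h1c
        simp only [List.cons.injEq] at h1c
        simp [List.getD, List.getElem?_eq_getElem hk, h1c.1]
      have h3' : ∀ m : Int, i + 1 ≤ m → (m ∈ R ↔ m ∈ pvResR t (bU.drop (k + 1)) (i + 1)) := by
        intro m hm
        rw [h3 m (by omega)]
        cases hbs : bs with
        | nil =>
          have hlen : bU.length ≤ k := by
            have hx := congrArg List.length (h2.symm.trans hbs)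
            simp at hx
            omega
          have hb : bU.drop (k + 1) = [] := List.drop_eq_nil_of_le (by omega)
          rw [hb]
          simp only [pvResR, if_neg hc]
          rw [pvResR_nil_b t (i + 1)]
        | cons bb bt =>
          have hb' : bU.drop k = bb :: bt := by rw [← h2, hbs]
          have hbt : bt = bU.drop (k + 1) := by
            have hd : (bU.drop k).drop 1 = bt := by rw [hb']; simp
            rw [← hd, List.drop_drop]
          simp only [pvResR, if_neg hc, ← hbt, List.mem_append]
          constructor
          · intro h
            rcases h with h | h
            · split_ifs at h <;> simp at h; omega
            · exact h
          · intro h; right; exact h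
      by_cases hdash : c = '-'
      · -- gap: emits nothing, k advances
        subst hdash
        simp only [PySem.List.enumerate_cons, List.map_cons, List.zip_cons_cons,
          List.filter_cons, pvBGo, if_neg hc]
        have hfil : (('-' : Char) != '-') = false := by simp
        rw [hfil]
        simp only [Bool.false_eq_true, if_neg (by simp : ¬False)]
        exact ih (bU.drop (k + 1)) (i + 1) (k + 1) h1' rfl h3'
      · -- real aligned character: emits the comparison, k advances
        have hmemb : i ∈ pvResR (c :: t) bs i ↔ (k < min aU.length bU.length ∧ aU.getD k ' ' ≠ bU.getD k ' ') := by
          cases hbs : bs with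
          | nil =>
            have hlen : bU.length ≤ k := by
              have hx := congrArg List.length (h2.symm.trans hbs)
              simp at hx
              omega
            simp only [pvResR, if_neg hc]
            constructor
            · intro h; simp at h
            · intro h; omega
          | cons bb bt =>
            have hb' : bU.drop k = bb :: bt := by rw [← h2, hbs]
            have hkb : k < bU.length := by
              by_contra hh
              rw [List.drop_eq_nil_of_le (by omega)] at hb'
              simp at hb'
            have hbUk : bU.getD k ' ' = bb := by
              rw [List.drop_eq_getElem_cons hkb] at hb'
              simp only [List.cons.injEq] at hb'
              simp [List.getD, List.getElem?_eq_getElem hkb, hb'.1]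
            simp only [pvResR, if_neg hc, List.mem_append]
            constructor
            · intro h
              rcases h with h | h
              · split_ifs at h with hh
                · refine ⟨by omega, ?_⟩
                  rw [haUk, hbUk]; exact hh.1
                · simp at h
              · exfalso; have := pvResR_ge t bt (i + 1) i h; omega
            · intro hcond
              left
              rw [haUk, hbUk] at hcond
              simp [hcond.2, hdash]
        simp only [PySem.List.enumerate_cons, List.map_cons, List.zip_cons_cons,
          List.filter_cons, pvBGo, if_neg hc, if_neg hdash]
        have hfil : (c != '-') = true := by simp [bne_iff_ne, hdash]
        rw [hfil]
        simp only [if_pos, List.map_cons]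
        rw [hRi, ih (bU.drop (k + 1)) (i + 1) (k + 1) h1' rfl h3']
        congr 1
        rw [decide_eq_decide.mpr hmemb, Bool.decide_and]
        congr 1
        rw [decide_not]
        exact Bool.not_inj_iff.mpr rfl

-- ===== VERDICT (by name: the statement is the Claim_ definition above) =====
theorem degap_and_track_modifications_spec : Claim_equal_degap_and_track_modifications := by
  intro a b _
  unfold Spec_degap_and_track_modifications degap_and_track_modifications degap_and_track_modifications_alt
  exact pvMain (a.toList.filter (fun c => !(PySem.Chars.islower c)))
    (b.toList.filter (fun c => !(PySem.Chars.islower c))) _ a.toList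
    (b.toList.filter (fun c => !(PySem.Chars.islower c))) 0 0 (by simp) (by simp)
    (fun m _ => by rw [pvRes_eq])
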